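-- pv_equiv track=rewrite | github.com/shibashishdas29-spec/dsa | make_pdf.py | build_pages
-- ===== SOURCE A (Python) =====
-- PAGE_HEIGHT = 792  # 11in * 72
--
-- TOP = 60
--
-- BOTTOM = 54
--
-- LEADING = 14
--
-- MAX_CHARS = 95
--
-- def wrap_line(line: str, width: int):
--     if not line:
--         return [""]
--     words = line.split(" ")
--     out = []
--     cur = words[0]
--     for w in words[1:]:
--         if len(cur) + 1 + len(w) <= width:
--             cur += " " + w
--         else:
--             out.append(cur)
--             cur = w
--     out.append(cur)
--     return out
--
-- def build_pages(text: str):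
--     logical_lines = []
--     for raw in text.splitlines():
--         logical_lines.extend(wrap_line(raw.rstrip(), MAX_CHARS))
--
--     lines_per_page = (PAGE_HEIGHT - TOP - BOTTOM) // LEADING
--     pages = []
--     for i in range(0, len(logical_lines), lines_per_page):
--         pages.append(logical_lines[i : i + lines_per_page])
--     return pages
-- ===== SOURCE B (Python) =====
-- PAGE_HEIGHT = 792
-- TOP = 60
-- BOTTOM = 54
-- LEADING = 14
-- MAX_CHARS = 95
--
-- def wrap_line(line: str, width: int):
--     if not line:
--         return [""]
--     words = line.split(" ")
--     out = []
--     cur = words[0]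
--     for w in words[1:]:
--         if len(cur) + 1 + len(w) <= width:
--             cur += " " + w
--         else:
--             out.append(cur)
--             cur = w
--     out.append(cur)
--     return out
--
-- def build_pages(text: str):
--     # one streaming pass: no intermediate flat list of logical lines
--     lines_per_page = (PAGE_HEIGHT - TOP - BOTTOM) // LEADING
--     pages = []
--     current = []
--     for raw in text.splitlines():
--         for line in wrap_line(raw.rstrip(), MAX_CHARS):
--             current.append(line)
--             if len(current) == lines_per_page:
--                 pages.append(current)
--                 current = []
--     if current:
--         pages.append(current)
--     return pages
-- ===== Notes on version B (the rewrite author's own statement) =====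
-- stated objective: alternative
-- what changed: build_pages no longer materializes the flat logical_lines list and slices it by index ranges; instead one streaming pass appends each wrapped line to the current page and flushes it when it reaches 48 lines, emitting the trailing partial page at the end.
import Mathlib
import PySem

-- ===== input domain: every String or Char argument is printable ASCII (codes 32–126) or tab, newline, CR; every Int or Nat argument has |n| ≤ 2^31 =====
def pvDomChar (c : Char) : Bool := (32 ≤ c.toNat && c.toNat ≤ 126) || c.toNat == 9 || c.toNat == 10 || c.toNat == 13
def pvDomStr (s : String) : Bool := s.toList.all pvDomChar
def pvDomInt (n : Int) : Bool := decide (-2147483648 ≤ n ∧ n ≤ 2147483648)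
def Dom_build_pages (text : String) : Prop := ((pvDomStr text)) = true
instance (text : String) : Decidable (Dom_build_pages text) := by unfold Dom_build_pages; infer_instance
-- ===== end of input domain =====

-- B replaces A's "collect all wrapped lines, then slice by index ranges" with one
-- streaming pass that flushes the current page when it is full (alternative decomposition).

-- ===== PORT A =====

-- shared helper: literal port of wrap_line (identical in Source A and Source B).
-- words[0]/words[1:]: str.split(" ") never returns an empty list, so headD/tail are exact.
def wrapLine (line : String) (width : Int) : List String :=
  if line = "" then [""]
  else
    let words := (PySem.Str.split? line " ").getD []
    let st := words.tail.foldl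
      (fun (st : List String × String) w =>
        if PySem.Str.len st.2 + 1 + PySem.Str.len w ≤ width then (st.1, st.2 ++ " " ++ w)
        else (st.1 ++ [st.2], w))
      ([], words.headD "")
    st.1 ++ [st.2]

def build_pages (text : String) : List (List String) :=
  let logicalLines := (PySem.Str.splitlines text).foldl
    (fun acc raw => acc ++ wrapLine (PySem.Str.rstrip raw) 95) []
  let linesPerPage := PySem.Int.floordiv (792 - 60 - 54) 14
  (PySem.List.pyRange 0 (logicalLines.length : Int) linesPerPage).foldl
    (fun pages i => pages ++ [PySem.List.slice logicalLines (some i) (some (i + linesPerPage))]) []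

-- ===== PORT B =====

def pageStep (lpp : Int) (st : List (List String) × List String) (line : String) :
    List (List String) × List String :=
  let cur := st.2 ++ [line]
  if (cur.length : Int) = lpp then (st.1 ++ [cur], []) else (st.1, cur)

def build_pages_alt (text : String) : List (List String) :=
  let linesPerPage := PySem.Int.floordiv (792 - 60 - 54) 14
  let st := (PySem.Str.splitlines text).foldl
    (fun st raw => (wrapLine (PySem.Str.rstrip raw) 95).foldl (pageStep linesPerPage) st)
    ([], [])
  if st.2.isEmpty then st.1 else st.1 ++ [st.2]

-- ===== PRECONDITION & SPEC =====
def Spec_build_pages (text : String) (out : List (List String)) : Prop := out = build_pages_alt text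
instance (text : String) (out : List (List String)) : Decidable (Spec_build_pages text out) := by unfold Spec_build_pages; infer_instance

-- ===== CLAIM (what is proved, stated in full; the proofs are below) =====
def Claim_equal_build_pages : Prop := ∀ (text : String), Dom_build_pages text → Spec_build_pages text (build_pages text)

-- ===== LEMMAS AND PROOFS =====

-- common reference: pages are 48-line chunks of the flat list
def chunks48 : List String → List (List String)
  | [] => []
  | x :: xs => ((x :: xs).take 48) :: chunks48 ((x :: xs).drop 48)
  termination_by L => L.length
  decreasing_by all_goals simp

theorem foldl_append_singleton {α β : Type} (f : α → β) (l : List α) (acc : List β) :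
    l.foldl (fun p i => p ++ [f i]) acc = acc ++ l.map f := by
  induction l generalizing acc with
  | nil => simp
  | cons x xs ih => simp [List.foldl_cons, ih, List.append_assoc]

theorem chunks48_nil : chunks48 [] = [] := by
  unfold chunks48
  rfl

theorem chunks48_cons (x : String) (xs : List String) :
    chunks48 (x :: xs) = ((x :: xs).take 48) :: chunks48 ((x :: xs).drop 48) := by
  conv_lhs => unfold chunks48

theorem chunks48_eq_map_range (L : List String) :
    chunks48 L = (List.range (if 0 < (L.length : Int) then
        (((L.length : Int) + 48 - 1) / 48).toNat else 0)).map
      (fun k => (L.drop (48 * k)).take 48) := by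
  match L with
  | [] => simp [chunks48_nil]
  | x :: xs =>
    have ih := chunks48_eq_map_range ((x :: xs).drop 48)
    have hlen : ((x :: xs).drop 48).length = (x :: xs).length - 48 := by simp
    have hcnt : (if 0 < ((x :: xs).length : Int) then
        ((((x :: xs).length : Int) + 48 - 1) / 48).toNat else 0)
        = (if 0 < (((x :: xs).drop 48).length : Int) then
        ((((x :: xs).drop 48).length : Int) + 48 - 1) / 48 |>.toNat else 0) + 1 := by
      rw [hlen]
      have h1 : 0 < (x :: xs).length := by simp
      split_ifs <;> push_cast <;> omega
    rw [chunks48_cons, hcnt, List.range_succ_eq_map, List.map_cons, List.map_map]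
    refine congrArg₂ (· :: ·) (by simp) ?_
    rw [ih]
    apply List.map_congr_left
    intro k _
    simp only [Function.comp_apply, List.drop_drop, Nat.mul_succ]
    rw [Nat.add_comm 48 (48 * k)]
  termination_by L.length

theorem pageStep_stream (L : List String) (pages : List (List String)) (cur : List String)
    (h : cur.length < 48) :
    (let st := L.foldl (pageStep 48) (pages, cur)
     if st.2.isEmpty then st.1 else st.1 ++ [st.2]) = pages ++ chunks48 (cur ++ L) := by
  induction L generalizing pages cur with
  | nil =>
    simp only [List.foldl_nil, List.append_nil]
    cases hc : cur with
    | nil => simp [chunks48_nil]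
    | cons y ys =>
      rw [chunks48_cons]
      have h48 : (y :: ys).length ≤ 48 := by rw [← hc]; omega
      simp [List.take_of_length_le h48, List.drop_eq_nil_of_le h48, chunks48_nil]
  | cons x L ih =>
    simp only [List.foldl_cons]
    by_cases hfull : (cur ++ [x]).length = 48
    · have hstep : pageStep 48 (pages, cur) x = (pages ++ [cur ++ [x]], []) := by
        simp [pageStep, hfull]
      rw [hstep, ih _ _ (by simp)]
      have hflat : cur ++ x :: L = (cur ++ [x]) ++ L := by simp
      rw [hflat]
      have hne : (cur ++ [x]) ++ L ≠ [] := by simp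
      obtain ⟨z, zs, hz⟩ := List.exists_cons_of_ne_nil hne
      rw [hz, chunks48_cons, ← hz]
      rw [List.take_append_of_le_length (by omega), List.drop_append_of_le_length (by omega)]
      simp [List.take_of_length_le (le_of_eq hfull), List.drop_eq_nil_of_le (le_of_eq hfull)]
    · have hstep : pageStep 48 (pages, cur) x = (pages, cur ++ [x]) := by
        simp only [pageStep]
        rw [if_neg (by exact_mod_cast hfull)]
      rw [hstep, ih _ _ (by simp at hfull ⊢; omega)]
      simp

theorem foldl_foldl_flatMap {α β γ : Type} (g : α → List β) (f : γ → β → γ)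
    (raws : List α) (init : γ) :
    raws.foldl (fun st raw => (g raw).foldl f st) init = (raws.flatMap g).foldl f init := by
  induction raws generalizing init with
  | nil => simp
  | cons r rs ih => simp [List.flatMap_cons, List.foldl_append, ih]

theorem foldl_append_eq_flatMap' {α β : Type} (g : α → List β) (raws : List α)
    (acc : List β) :
    raws.foldl (fun acc raw => acc ++ g raw) acc = acc ++ raws.flatMap g := by
  induction raws generalizing acc with
  | nil => simp
  | cons r rs ih => simp [List.flatMap_cons, ih]

theorem slice_loop_eq_chunks (L : List String) :
    (PySem.List.pyRange 0 (L.length : Int) 48).foldl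
      (fun pages i => pages ++ [PySem.List.slice L (some i) (some (i + 48))]) []
    = chunks48 L := by
  rw [PySem.List.pyRange_of_pos _ _ (by norm_num), foldl_append_singleton,
    chunks48_eq_map_range, List.map_map]
  have hc : ((L.length : Int) - 0 + 48 - 1) / 48 = ((L.length : Int) + 48 - 1) / 48 := by
    norm_num
  rw [hc]
  apply List.map_congr_left
  intro k _
  simp only [Function.comp_apply]
  have h1 : (0 : Int) + 48 * (k : Int) = ((48 * k : Nat) : Int) := by push_cast; ring
  rw [h1]
  have h2 : ((48 * k : Nat) : Int) + 48 = ((48 * k : Nat) : Int) + ((48 : Nat) : Int) := by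
    push_cast; ring
  rw [h2, PySem.List.slice_natCast_add]

theorem build_pages_eq_chunks (text : String) :
    build_pages text = chunks48 ((PySem.Str.splitlines text).flatMap
      (fun raw => wrapLine (PySem.Str.rstrip raw) 95)) := by
  unfold build_pages
  have hlpp : PySem.Int.floordiv (792 - 60 - 54) 14 = 48 := by decide
  simp only [hlpp]
  rw [slice_loop_eq_chunks,
    foldl_append_eq_flatMap' (fun raw => wrapLine (PySem.Str.rstrip raw) 95)]
  simp

theorem build_pages_alt_eq_chunks (text : String) :
    build_pages_alt text = chunks48 ((PySem.Str.splitlines text).flatMap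
      (fun raw => wrapLine (PySem.Str.rstrip raw) 95)) := by
  unfold build_pages_alt
  have hlpp : PySem.Int.floordiv (792 - 60 - 54) 14 = 48 := by decide
  simp only [hlpp]
  rw [foldl_foldl_flatMap]
  have := pageStep_stream ((PySem.Str.splitlines text).flatMap
      (fun raw => wrapLine (PySem.Str.rstrip raw) 95)) [] [] (by simp)
  simpa using this

-- ===== VERDICT (by name: the statement is the Claim_ definition above) =====
theorem build_pages_spec : Claim_equal_build_pages := by
  intro text _
  unfold Spec_build_pages
  rw [build_pages_eq_chunks, build_pages_alt_eq_chunks]
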